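-- pv_equiv track=rewrite | github.com/zigsphere/cd4pe-slack_webhook | main.py | check_duplicates_for_key
-- ===== SOURCE A (Python) =====
-- def check_duplicates_for_key(data: dict, paths: list):
--   data_new = {}
--
--   for path, values in data.items():
--     filtered_values= []
--
--     if path in paths:
--       for item in values:
--         if item in filtered_values:
--           return True
--         filtered_values.append(item)
--   return False
-- ===== SOURCE B (Python) =====
-- def check_duplicates_for_key(data: dict, paths: list):
--     return any(len(values) != len(set(values))
--                for path, values in data.items() if path in paths)
-- ===== Notes on version B (the rewrite author's own statement) =====
-- stated objective: idiomatic
-- what changed: Replaces the element-by-element membership scan with early return by a one-shot set-cardinality distinctness check (len(values) != len(set(values))) inside a single any(...) over the selected paths.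
import Mathlib
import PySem

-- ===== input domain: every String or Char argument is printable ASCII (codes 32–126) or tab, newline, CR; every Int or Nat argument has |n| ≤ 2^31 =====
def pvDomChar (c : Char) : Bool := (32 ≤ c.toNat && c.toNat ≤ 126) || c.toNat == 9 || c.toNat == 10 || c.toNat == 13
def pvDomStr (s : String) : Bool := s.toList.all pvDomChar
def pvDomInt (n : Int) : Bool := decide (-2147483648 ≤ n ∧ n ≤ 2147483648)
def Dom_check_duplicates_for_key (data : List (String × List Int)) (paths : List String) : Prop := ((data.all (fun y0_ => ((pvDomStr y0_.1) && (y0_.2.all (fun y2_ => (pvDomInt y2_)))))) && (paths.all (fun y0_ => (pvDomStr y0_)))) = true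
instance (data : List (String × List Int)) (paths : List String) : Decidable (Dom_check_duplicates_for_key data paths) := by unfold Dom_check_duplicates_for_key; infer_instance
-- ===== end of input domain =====

-- B replaces A's element-by-element membership scan (early return on first repeat)
-- by an idiomatic per-path set-cardinality distinctness check inside one any(...).

-- ===== PORT A =====
-- inner loop: 'for item in values: if item in filtered_values: return True; filtered_values.append(item)'
def chkA_inner : List Int → List Int → Bool
  | [], _ => false
  | item :: rest, filtered =>
    if filtered.contains item then true else chkA_inner rest (filtered ++ [item])

def check_duplicates_for_key (data : List (String × List Int)) (paths : List String) : Bool :=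
  match data with
  | [] => false
  | (path, values) :: rest =>
    if paths.contains path then
      if chkA_inner values [] then true else check_duplicates_for_key rest paths
    else check_duplicates_for_key rest paths

-- ===== PORT B =====
-- any(len(values) != len(set(values)) for path, values in data.items() if path in paths)
def check_duplicates_for_key_alt (data : List (String × List Int)) (paths : List String) : Bool :=
  data.any (fun pv => paths.contains pv.1 && (pv.2.length != (PySem.Set.ofList pv.2).length))

-- ===== PRECONDITION & SPEC =====
def Spec_check_duplicates_for_key (data : List (String × List Int)) (paths : List String) (out : Bool) : Prop := out = check_duplicates_for_key_alt data paths
instance (data : List (String × List Int)) (paths : List String) (out : Bool) : Decidable (Spec_check_duplicates_for_key data paths out) := by unfold Spec_check_duplicates_for_key; infer_instance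

-- ===== CLAIM (what is proved, stated in full; the proofs are below) =====
def Claim_equal_check_duplicates_for_key : Prop := ∀ (data : List (String × List Int)) (paths : List String), Dom_check_duplicates_for_key data paths → Spec_check_duplicates_for_key data paths (check_duplicates_for_key data paths)

-- ===== LEMMAS AND PROOFS =====

-- A's inner scan returns true exactly when 'acc ++ v' has a repeat (acc duplicate-free)
theorem chkA_inner_eq (v acc : List Int) (h : acc.Nodup) :
    chkA_inner v acc = !decide ((acc ++ v).Nodup) := by
  induction v generalizing acc with
  | nil => simp [chkA_inner, h]
  | cons x xs ih =>
    by_cases hx : x ∈ acc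
    · simp only [chkA_inner, List.contains_eq_mem, hx, decide_true, if_true]
      have hnd : ¬ (acc ++ x :: xs).Nodup := by
        rw [List.nodup_append]
        rintro ⟨-, -, hd⟩
        exact hd x hx x List.mem_cons_self rfl
      simp [hnd]
    · have hacc : (acc ++ [x]).Nodup := by
        rw [List.nodup_append]
        refine ⟨h, List.nodup_singleton x, ?_⟩
        intro a ha
        simp
        rintro rfl; exact hx ha
      rw [chkA_inner]
      simp only [List.contains_eq_mem, hx, decide_false, Bool.false_eq_true, if_false]
      rw [ih _ hacc, List.append_assoc]
      rfl

theorem ofList_sublist (xs : List Int) : (PySem.Set.ofList xs).Sublist xs := by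
  induction xs with
  | nil => simp [PySem.Set.ofList_nil]
  | cons x xs ih =>
    rw [PySem.Set.ofList_cons]
    exact List.Sublist.cons₂ x (List.Sublist.trans List.filter_sublist ih)

-- len(set(xs)) == len(xs) exactly when xs has no repeat
theorem ofList_len_eq_iff (xs : List Int) :
    ((PySem.Set.ofList xs).length = xs.length) ↔ xs.Nodup := by
  constructor
  · intro hl
    have := List.Sublist.eq_of_length (ofList_sublist xs) hl
    rw [← this]; exact PySem.Set.nodup_ofList xs
  · intro h; rw [PySem.Set.ofList_eq_self_of_nodup xs h]

-- A = B, unconditionally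
theorem main_eq (data : List (String × List Int)) (paths : List String) :
    check_duplicates_for_key data paths = check_duplicates_for_key_alt data paths := by
  induction data with
  | nil => rfl
  | cons pv rest ih =>
    obtain ⟨path, values⟩ := pv
    rw [check_duplicates_for_key]
    rw [chkA_inner_eq values [] List.nodup_nil]
    simp only [List.nil_append, check_duplicates_for_key_alt, List.any_cons]
    by_cases hp : paths.contains path = true
    · rw [if_pos hp, hp]
      by_cases hn : values.Nodup
      · have hl : (PySem.Set.ofList values).length = values.length :=
          (ofList_len_eq_iff values).mpr hn
        simp [hn, hl, ih, check_duplicates_for_key_alt, bne]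
      · have hl : values.length ≠ (PySem.Set.ofList values).length :=
          fun e => hn ((ofList_len_eq_iff values).mp e.symm)
        simp [hn, hl, bne]
    · simp only [Bool.not_eq_true] at hp
      rw [hp]
      simp [ih, check_duplicates_for_key_alt]

-- ===== VERDICT (by name: the statement is the Claim_ definition above) =====
theorem check_duplicates_for_key_spec : Claim_equal_check_duplicates_for_key :=
  fun data paths _ => main_eq data paths
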